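-- pv_equiv track=rewrite | github.com/wyjistest/LongTarget-exact-sim | scripts/benchmark_fasim_sim_recovery_learned_detector_negative_dataset.py | telemetry
-- ===== SOURCE A (Python) =====
-- from collections import Counter, defaultdict
-- from typing import Dict, List, Sequence, Tuple
--
-- def fmt(value: float) -> str:
--     return f"{value:.6f}"
--
-- def telemetry(rows: Sequence[Dict[str, str]], source_rows: Sequence[Dict[str, str]]) -> Dict[str, str]:
--     labels = Counter(row["label"] for row in rows)
--     splits = Counter((row["split"], row["label"]) for row in rows)
--     negative_sources = Counter(
--         row["hard_negative_source"] for row in rows if row["label"] == "0"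
--     )
--     accepted = [
--         row
--         for row in source_rows
--         if row.get("source") == "accepted_candidate"
--         and row.get("label_guard_should_accept") in ("0", "1")
--     ]
--     accepted_positive = sum(1 for row in accepted if row.get("label_guard_should_accept") == "1")
--     sim_records = [
--         row
--         for row in source_rows
--         if row.get("source") == "sim_record" and row.get("label_available") == "1"
--     ]
--     positive = labels.get("1", 0)
--     negative = labels.get("0", 0)
--     return {
--         "enabled": "1",
--         "source_rows": str(len(source_rows)),
--         "rows": str(len(rows)),
--         "positive_rows": str(positive),
--         "negative_rows": str(negative),
--         "learnable_two_class": "1" if positive and negative else "0",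
--         "class_balance": fmt(negative / positive if positive else 0.0),
--         "train_positive": str(splits.get(("train", "1"), 0)),
--         "train_negative": str(splits.get(("train", "0"), 0)),
--         "validation_positive": str(splits.get(("validation", "1"), 0)),
--         "validation_negative": str(splits.get(("validation", "0"), 0)),
--         "hard_negative_sources": ",".join(
--             f"{key}:{value}" for key, value in sorted(negative_sources.items())
--         )
--         or "none",
--         "baseline_guard_recall_vs_sim": fmt(
--             accepted_positive / len(sim_records) * 100.0 if sim_records else 0.0
--         ),
--         "baseline_guard_precision": fmt(
--             accepted_positive / len(accepted) * 100.0 if accepted else 0.0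
--         ),
--         "production_model": "0",
--         "sim_labels_runtime_inputs": "0",
--         "runtime_behavior_changed": "0",
--     }
-- ===== SOURCE B (Python) =====
-- def fmt(value: float) -> str:
--     return f"{value:.6f}"
--
--
-- def telemetry(rows, source_rows):
--     positive = 0
--     negative = 0
--     train_pos = 0
--     train_neg = 0
--     val_pos = 0
--     val_neg = 0
--     neg_sources = {}
--     for row in rows:
--         label = row["label"]
--         split = row["split"]
--         if label == "1":
--             positive += 1
--             if split == "train":
--                 train_pos += 1
--             elif split == "validation":
--                 val_pos += 1
--         elif label == "0":
--             negative += 1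
--             if split == "train":
--                 train_neg += 1
--             elif split == "validation":
--                 val_neg += 1
--             src = row["hard_negative_source"]
--             neg_sources[src] = neg_sources.get(src, 0) + 1
--     accepted = 0
--     accepted_positive = 0
--     sim_records = 0
--     for row in source_rows:
--         src = row.get("source")
--         if src == "accepted_candidate":
--             guard = row.get("label_guard_should_accept")
--             if guard in ("0", "1"):
--                 accepted += 1
--                 if guard == "1":
--                     accepted_positive += 1
--         elif src == "sim_record" and row.get("label_available") == "1":
--             sim_records += 1
--     pairs = ",".join(f"{key}:{value}" for key, value in sorted(neg_sources.items()))
--     return {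
--         "enabled": "1",
--         "source_rows": str(len(source_rows)),
--         "rows": str(len(rows)),
--         "positive_rows": str(positive),
--         "negative_rows": str(negative),
--         "learnable_two_class": "1" if positive and negative else "0",
--         "class_balance": fmt(negative / positive if positive else 0.0),
--         "train_positive": str(train_pos),
--         "train_negative": str(train_neg),
--         "validation_positive": str(val_pos),
--         "validation_negative": str(val_neg),
--         "hard_negative_sources": pairs or "none",
--         "baseline_guard_recall_vs_sim": fmt(
--             accepted_positive / sim_records * 100.0 if sim_records else 0.0
--         ),
--         "baseline_guard_precision": fmt(
--             accepted_positive / accepted * 100.0 if accepted else 0.0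
--         ),
--         "production_model": "0",
--         "sim_labels_runtime_inputs": "0",
--         "runtime_behavior_changed": "0",
--     }
-- ===== Notes on version B (the rewrite author's own statement) =====
-- stated objective: alternative
-- what changed: The three Counter scans over rows and the two list comprehensions plus sum over source_rows are replaced by two explicit single-pass loops that maintain plain integer accumulators and one plain dict of hard-negative-source counts, trading five traversals and intermediate lists for two passes with O(1) extra state (besides the source dict).
import Mathlib
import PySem

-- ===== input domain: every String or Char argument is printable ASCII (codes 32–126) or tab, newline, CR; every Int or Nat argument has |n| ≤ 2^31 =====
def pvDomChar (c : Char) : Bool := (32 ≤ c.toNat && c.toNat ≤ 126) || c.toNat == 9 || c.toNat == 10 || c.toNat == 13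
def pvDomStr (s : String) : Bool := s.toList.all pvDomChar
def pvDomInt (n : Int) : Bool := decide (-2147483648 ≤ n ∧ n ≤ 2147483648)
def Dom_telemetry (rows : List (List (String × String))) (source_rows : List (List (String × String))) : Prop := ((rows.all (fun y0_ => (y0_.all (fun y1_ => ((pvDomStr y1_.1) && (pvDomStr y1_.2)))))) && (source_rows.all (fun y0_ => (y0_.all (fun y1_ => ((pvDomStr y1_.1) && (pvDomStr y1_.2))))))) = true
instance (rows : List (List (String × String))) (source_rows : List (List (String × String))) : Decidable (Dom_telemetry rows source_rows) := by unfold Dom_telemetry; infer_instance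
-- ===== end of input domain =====

-- B replaces A's three Counter scans over `rows` and the two comprehensions + sum over
-- `source_rows` by two explicit single-pass loops with plain integer accumulators and one
-- plain dict of hard-negative-source counts (objective: alternative decomposition, same cost).
--
-- Shared language-primitive helpers (used identically by BOTH Pythons, so by both ports):
-- pvGet?/pvItem model row.get(k) / row[k] on an association-list dict (first match);
-- pvRnd/pvNorm/pvDivD/pvMul100/pvFmt model CPython's IEEE-754 double division,
-- multiplication by 100.0 and "%.6f" formatting exactly (round-to-nearest-even binary64,
-- then correctly rounded decimal output); both Pythons contain the very same float
-- expressions, so both ports call these helpers with the same meaning.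

def pvGet? (row : List (String × String)) (k : String) : Option String :=
  (row.find? (fun p => p.1 == k)).map (fun p => p.2)

def pvItem (row : List (String × String)) (k : String) : String :=
  (pvGet? row k).getD ""

-- round q + r/D (0 ≤ r < D) to the nearest integer, ties to even
def pvRnd (q r D : Nat) : Nat :=
  if 2 * r < D then q else if D < 2 * r then q + 1 else if q % 2 == 0 then q else q + 1

-- round a positive mantissa to 53 bits: value m·2^e as a binary64
def pvNorm (m : Nat) (e : Int) : Nat × Int :=
  let b := PySem.Int.bitLength (m : Int)
  if b ≤ 53 then (m, e)
  else
    let s := b - 53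
    let m2 := pvRnd (m / 2 ^ s) (m % 2 ^ s) (2 ^ s)
    if m2 == 2 ^ 53 then (2 ^ 52, e + s + 1) else (m2, e + s)

-- the binary64 nearest to n/d (n ≥ 0, d > 0), as (mantissa, exponent)
def pvDivD (n d : Nat) : Nat × Int :=
  if n == 0 then (0, 0)
  else
    let t : Int := (PySem.Int.bitLength (n : Int) : Int) - PySem.Int.bitLength (d : Int) - 53
    let N := if t ≤ 0 then n * 2 ^ (-t).toNat else n
    let D := if t ≤ 0 then d else d * 2 ^ t.toNat
    let q := N / D
    let r := N % D
    if q < 2 ^ 53 then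
      let m := pvRnd q r D
      if m == 2 ^ 53 then (2 ^ 52, t + 1) else (m, t)
    else
      let m := pvRnd (q / 2) (q % 2 * D + r) (2 * D)
      if m == 2 ^ 53 then (2 ^ 52, t + 2) else (m, t + 1)

-- binary64 multiplication by 100.0
def pvMul100 (me : Nat × Int) : Nat × Int :=
  if me.1 == 0 then (0, 0) else pvNorm (me.1 * 100) me.2

-- f"{v:.6f}" for a nonnegative binary64 (m, e)
def pvFmt (me : Nat × Int) : String :=
  let n6 :=
    if 0 ≤ me.2 then me.1 * 2 ^ me.2.toNat * 1000000
    else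
      let q := 2 ^ (-me.2).toNat
      pvRnd (me.1 * 1000000 / q) (me.1 * 1000000 % q) q
  PySem.Int.toStr ((n6 / 1000000 : Nat) : Int) ++ "." ++
    PySem.Str.zfill (PySem.Int.toStr ((n6 % 1000000 : Nat) : Int)) 6

-- ===== PORT A =====
def telemetry (rows : List (List (String × String))) (source_rows : List (List (String × String))) : List (String × String) :=
  let labels := PySem.Dict.counter (rows.map (fun row => pvItem row "label"))
  let splits := PySem.Dict.counter (rows.map (fun row => (pvItem row "split", pvItem row "label")))
  let negSources := PySem.Dict.counter
    ((rows.filter (fun row => pvItem row "label" == "0")).map (fun row => pvItem row "hard_negative_source"))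
  let accepted := source_rows.filter (fun row =>
    pvGet? row "source" == some "accepted_candidate" &&
      (pvGet? row "label_guard_should_accept" == some "0" || pvGet? row "label_guard_should_accept" == some "1"))
  let acceptedPositive : Int :=
    (accepted.map (fun row => if pvGet? row "label_guard_should_accept" == some "1" then (1 : Int) else 0)).sum
  let simRecords := source_rows.filter (fun row =>
    pvGet? row "source" == some "sim_record" && pvGet? row "label_available" == some "1")
  let positive : Int := labels.getD "1" 0
  let negative : Int := labels.getD "0" 0
  let hns := PySem.Str.join ","
    ((PySem.List.sorted2 negSources.items (fun p => p.1) (fun p => p.2)).map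
      (fun p => p.1 ++ ":" ++ PySem.Int.toStr p.2))
  [("enabled", "1"),
   ("source_rows", PySem.Int.toStr (source_rows.length : Int)),
   ("rows", PySem.Int.toStr (rows.length : Int)),
   ("positive_rows", PySem.Int.toStr positive),
   ("negative_rows", PySem.Int.toStr negative),
   ("learnable_two_class", if positive ≠ 0 ∧ negative ≠ 0 then "1" else "0"),
   ("class_balance", pvFmt (if positive ≠ 0 then pvDivD negative.toNat positive.toNat else (0, 0))),
   ("train_positive", PySem.Int.toStr (splits.getD ("train", "1") 0)),
   ("train_negative", PySem.Int.toStr (splits.getD ("train", "0") 0)),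
   ("validation_positive", PySem.Int.toStr (splits.getD ("validation", "1") 0)),
   ("validation_negative", PySem.Int.toStr (splits.getD ("validation", "0") 0)),
   ("hard_negative_sources", if hns = "" then "none" else hns),
   ("baseline_guard_recall_vs_sim",
     pvFmt (if simRecords.length ≠ 0 then pvMul100 (pvDivD acceptedPositive.toNat simRecords.length) else (0, 0))),
   ("baseline_guard_precision",
     pvFmt (if accepted.length ≠ 0 then pvMul100 (pvDivD acceptedPositive.toNat accepted.length) else (0, 0))),
   ("production_model", "0"),
   ("sim_labels_runtime_inputs", "0"),
   ("runtime_behavior_changed", "0")]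

-- ===== PORT B =====
structure BRow where
  p : Int
  n : Int
  tp : Int
  tn : Int
  vp : Int
  vn : Int
  srcs : PySem.Dict String Int
deriving Repr, DecidableEq

-- one iteration of B's first loop (over `rows`)
def bRowStep (s : BRow) (row : List (String × String)) : BRow :=
  let label := pvItem row "label"
  let split := pvItem row "split"
  if label == "1" then
    if split == "train" then { s with p := s.p + 1, tp := s.tp + 1 }
    else if split == "validation" then { s with p := s.p + 1, vp := s.vp + 1 }
    else { s with p := s.p + 1 }
  else if label == "0" then
    let src := pvItem row "hard_negative_source"
    let d := s.srcs.insert src (s.srcs.getD src 0 + 1)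
    if split == "train" then { s with n := s.n + 1, tn := s.tn + 1, srcs := d }
    else if split == "validation" then { s with n := s.n + 1, vn := s.vn + 1, srcs := d }
    else { s with n := s.n + 1, srcs := d }
  else s

-- one iteration of B's second loop (over `source_rows`): (accepted, accepted_positive, sim_records)
def bSrcStep (s : Int × Int × Int) (row : List (String × String)) : Int × Int × Int :=
  let src := pvGet? row "source"
  if src == some "accepted_candidate" then
    let g := pvGet? row "label_guard_should_accept"
    if g == some "0" || g == some "1" then
      if g == some "1" then (s.1 + 1, s.2.1 + 1, s.2.2) else (s.1 + 1, s.2.1, s.2.2)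
    else s
  else if src == some "sim_record" && pvGet? row "label_available" == some "1" then
    (s.1, s.2.1, s.2.2 + 1)
  else s

def telemetry_alt (rows : List (List (String × String))) (source_rows : List (List (String × String))) : List (String × String) :=
  let st := rows.foldl bRowStep ⟨0, 0, 0, 0, 0, 0, PySem.Dict.empty⟩
  let acc := (source_rows.foldl bSrcStep (0, 0, 0)).1
  let accPos := (source_rows.foldl bSrcStep (0, 0, 0)).2.1
  let sim := (source_rows.foldl bSrcStep (0, 0, 0)).2.2
  let pairs := PySem.Str.join ","
    ((PySem.List.sorted2 st.srcs.items (fun p => p.1) (fun p => p.2)).map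
      (fun p => p.1 ++ ":" ++ PySem.Int.toStr p.2))
  [("enabled", "1"),
   ("source_rows", PySem.Int.toStr (source_rows.length : Int)),
   ("rows", PySem.Int.toStr (rows.length : Int)),
   ("positive_rows", PySem.Int.toStr st.p),
   ("negative_rows", PySem.Int.toStr st.n),
   ("learnable_two_class", if st.p ≠ 0 ∧ st.n ≠ 0 then "1" else "0"),
   ("class_balance", pvFmt (if st.p ≠ 0 then pvDivD st.n.toNat st.p.toNat else (0, 0))),
   ("train_positive", PySem.Int.toStr st.tp),
   ("train_negative", PySem.Int.toStr st.tn),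
   ("validation_positive", PySem.Int.toStr st.vp),
   ("validation_negative", PySem.Int.toStr st.vn),
   ("hard_negative_sources", if pairs = "" then "none" else pairs),
   ("baseline_guard_recall_vs_sim",
     pvFmt (if sim ≠ 0 then pvMul100 (pvDivD accPos.toNat sim.toNat) else (0, 0))),
   ("baseline_guard_precision",
     pvFmt (if acc ≠ 0 then pvMul100 (pvDivD accPos.toNat acc.toNat) else (0, 0))),
   ("production_model", "0"),
   ("sim_labels_runtime_inputs", "0"),
   ("runtime_behavior_changed", "0")]

-- ===== PRECONDITION & SPEC =====
-- Pre_ excludes exactly the inputs on which the Python A raises KeyError: a row of `rows`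
-- missing "label" or "split", or a row labelled "0" missing "hard_negative_source".
def Pre_telemetry (rows : List (List (String × String))) (source_rows : List (List (String × String))) : Prop :=
  ∀ row ∈ rows, (pvGet? row "label").isSome ∧ (pvGet? row "split").isSome ∧
    (pvGet? row "label" = some "0" → (pvGet? row "hard_negative_source").isSome)
instance (rows : List (List (String × String))) (source_rows : List (List (String × String))) : Decidable (Pre_telemetry rows source_rows) := by unfold Pre_telemetry; infer_instance

def pvWitness_telemetry : (List (List (String × String))) × (List (List (String × String))) :=
  ([[("label", "1"), ("split", "train")], [("label", "0"), ("split", "validation"), ("hard_negative_source", "shuffle")]],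
   [[("source", "accepted_candidate"), ("label_guard_should_accept", "1")], [("source", "sim_record"), ("label_available", "1")]])

def Spec_telemetry (rows : List (List (String × String))) (source_rows : List (List (String × String))) (out : List (String × String)) : Prop := out = telemetry_alt rows source_rows
instance (rows : List (List (String × String))) (source_rows : List (List (String × String))) (out : List (String × String)) : Decidable (Spec_telemetry rows source_rows out) := by unfold Spec_telemetry; infer_instance

-- ===== CLAIM (what is proved, stated in full; the proofs are below) =====
def Claim_equal_telemetry : Prop := ∀ (rows : List (List (String × String))) (source_rows : List (List (String × String))), Dom_telemetry rows source_rows → Pre_telemetry rows source_rows → Spec_telemetry rows source_rows (telemetry rows source_rows)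

-- ===== LEMMAS AND PROOFS =====

-- B's first loop, characterised: each accumulator is a countP / a counter-building fold
lemma loopB_spec (rows : List (List (String × String))) (s : BRow) :
    rows.foldl bRowStep s =
      ⟨s.p + (rows.countP (fun r => pvItem r "label" == "1") : Int),
       s.n + (rows.countP (fun r => pvItem r "label" == "0") : Int),
       s.tp + (rows.countP (fun r => pvItem r "label" == "1" && pvItem r "split" == "train") : Int),
       s.tn + (rows.countP (fun r => pvItem r "label" == "0" && pvItem r "split" == "train") : Int),
       s.vp + (rows.countP (fun r => pvItem r "label" == "1" && pvItem r "split" == "validation") : Int),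
       s.vn + (rows.countP (fun r => pvItem r "label" == "0" && pvItem r "split" == "validation") : Int),
       ((rows.filter (fun r => pvItem r "label" == "0")).map (fun r => pvItem r "hard_negative_source")).foldl
         (fun d x => d.insert x (d.getD x 0 + 1)) s.srcs⟩ := by
  induction rows generalizing s with
  | nil => simp
  | cons row rest ih =>
    rw [List.foldl_cons, ih]
    unfold bRowStep
    simp only [List.countP_cons, List.filter_cons]
    by_cases h1 : pvItem row "label" == "1" <;>
      by_cases h0 : pvItem row "label" == "0" <;>
      by_cases ht : pvItem row "split" == "train" <;>
      by_cases hv : pvItem row "split" == "validation" <;>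
      simp [h1, h0, ht, hv, BRow.mk.injEq] <;>
      first
        | omega
        | exact absurd ((eq_of_beq h1).symm.trans (eq_of_beq h0)) (by decide)
        | exact absurd ((eq_of_beq ht).symm.trans (eq_of_beq hv)) (by decide)

-- B's second loop, characterised
lemma loopS_spec (source_rows : List (List (String × String))) (s : Int × Int × Int) :
    source_rows.foldl bSrcStep s =
      (s.1 + (source_rows.countP (fun r =>
          pvGet? r "source" == some "accepted_candidate" &&
            (pvGet? r "label_guard_should_accept" == some "0" || pvGet? r "label_guard_should_accept" == some "1")) : Int),
       s.2.1 + (source_rows.countP (fun r =>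
          pvGet? r "source" == some "accepted_candidate" &&
            (pvGet? r "label_guard_should_accept" == some "0" || pvGet? r "label_guard_should_accept" == some "1") &&
            pvGet? r "label_guard_should_accept" == some "1") : Int),
       s.2.2 + (source_rows.countP (fun r =>
          pvGet? r "source" == some "sim_record" && pvGet? r "label_available" == some "1") : Int)) := by
  induction source_rows generalizing s with
  | nil => simp
  | cons row rest ih =>
    rw [List.foldl_cons, ih]
    unfold bSrcStep
    simp only [List.countP_cons]
    by_cases ha : pvGet? row "source" == some "accepted_candidate" <;>
      by_cases hs : pvGet? row "source" == some "sim_record" <;>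
      by_cases h0 : pvGet? row "label_guard_should_accept" == some "0" <;>
      by_cases h1 : pvGet? row "label_guard_should_accept" == some "1" <;>
      by_cases hl : pvGet? row "label_available" == some "1" <;>
      simp [ha, hs, h0, h1, hl, Prod.ext_iff] <;>
      first
        | omega
        | exact absurd ((eq_of_beq ha).symm.trans (eq_of_beq hs)) (by decide)

-- label / (split,label) Counter lookups are countP's over rows
lemma cnt_lab (rows : List (List (String × String))) (lb : String) :
    (rows.map (fun row => pvItem row "label")).count lb
      = rows.countP (fun r => pvItem r "label" == lb) := by
  rw [List.count_eq_countP, List.countP_map]; rfl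

lemma cnt_split (rows : List (List (String × String))) (sp lb : String) :
    (rows.map (fun row => (pvItem row "split", pvItem row "label"))).count (sp, lb)
      = rows.countP (fun r => pvItem r "label" == lb && pvItem r "split" == sp) := by
  rw [List.count_eq_countP, List.countP_map]
  apply List.countP_congr
  intro r _
  have h : ((pvItem r "split", pvItem r "label") == (sp, lb))
      = (pvItem r "split" == sp && pvItem r "label" == lb) := rfl
  simp only [Function.comp_apply, h, Bool.and_comm]

-- A's accepted_positive predicate equals B's, pointwise
lemma cnt_ap (l : List (List (String × String))) :
    l.countP (fun r => pvGet? r "label_guard_should_accept" == some "1" &&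
        (pvGet? r "source" == some "accepted_candidate" &&
          (pvGet? r "label_guard_should_accept" == some "0" || pvGet? r "label_guard_should_accept" == some "1")))
      = l.countP (fun r => pvGet? r "source" == some "accepted_candidate" &&
          (pvGet? r "label_guard_should_accept" == some "0" || pvGet? r "label_guard_should_accept" == some "1") &&
          pvGet? r "label_guard_should_accept" == some "1") := by
  apply List.countP_congr
  intro r _
  cases pvGet? r "source" == some "accepted_candidate" <;>
    cases pvGet? r "label_guard_should_accept" == some "0" <;>
    cases pvGet? r "label_guard_should_accept" == some "1" <;> rfl

-- ===== VERDICT (by name: the statement is the Claim_ definition above) =====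
theorem telemetry_spec : Claim_equal_telemetry := by
  intro rows source_rows _ _
  unfold Spec_telemetry telemetry telemetry_alt
  rw [loopB_spec, loopS_spec]
  simp only [PySem.Dict.getD_counter, cnt_lab, cnt_split, zero_add,
    PySem.List.sum_map_ite_one_zero, List.countP_filter, ← List.countP_eq_length_filter,
    cnt_ap, PySem.Dict.foldl_insert_getD_add_one_eq_counter, Int.toNat_natCast,
    Int.natCast_ne_zero]
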